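-- pv_equiv track=rewrite | github.com/Manuel123cool/JazzArranger | readLeadSheetServer.py | _get_scale_pitch_classes_for_key_sig
-- ===== SOURCE A (Python) =====
-- _MAJOR_SCALE_INTERVALS = [0, 2, 4, 5, 7, 9, 11]
--
-- _SHARP_KEY_TONICS_PC = [7, 2, 9, 4, 11, 6, 1]
--
-- _FLAT_KEY_TONICS_PC = [5, 10, 3, 8, 1, 6, 11]
--
-- _NEUTRAL_KEY_TONIC_PC = 0
--
-- _PITCH_CLASS_SCALES_CACHE = {} # Cache für bereits berechnete Skalen-Pitch-Klassen
--
-- def _get_scale_pitch_classes_for_key_sig(key_signature_num):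
--     """
--     Gibt eine Menge von Pitch-Klassen (0-11) für die Dur-Tonleiter
--     zurück, die durch key_signature_num definiert wird.
--     key_signature_num: 0 für C, positive Zahlen für Kreuze, negative für Bs.
--     """
--     if key_signature_num in _PITCH_CLASS_SCALES_CACHE:
--         return _PITCH_CLASS_SCALES_CACHE[key_signature_num]
--
--     tonic_pc = -1
--     if key_signature_num == 0:
--         tonic_pc = _NEUTRAL_KEY_TONIC_PC
--     elif key_signature_num > 0:
--         if 1 <= key_signature_num <= len(_SHARP_KEY_TONICS_PC):
--             tonic_pc = _SHARP_KEY_TONICS_PC[key_signature_num - 1]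
--         else:
--             raise ValueError(f"Ungültige Anzahl von Kreuzen: {key_signature_num}")
--     else: # key_signature_num < 0
--         if -len(_FLAT_KEY_TONICS_PC) <= key_signature_num <= -1:
--             tonic_pc = _FLAT_KEY_TONICS_PC[-key_signature_num - 1]
--         else:
--             raise ValueError(f"Ungültige Anzahl von Bs: {key_signature_num}")
--
--     scale_pcs = {(tonic_pc + interval) % 12 for interval in _MAJOR_SCALE_INTERVALS}
--     _PITCH_CLASS_SCALES_CACHE[key_signature_num] = scale_pcs
--     return scale_pcs
-- ===== SOURCE B (Python) =====
-- _MAJOR_SCALE_INTERVALS = [0, 2, 4, 5, 7, 9, 11]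
--
-- _PITCH_CLASS_SCALES_CACHE = {}
--
-- def _get_scale_pitch_classes_for_key_sig(key_signature_num):
--     """Major-scale pitch classes for a key signature, via the circle of fifths."""
--     if key_signature_num in _PITCH_CLASS_SCALES_CACHE:
--         return _PITCH_CLASS_SCALES_CACHE[key_signature_num]
--     if not (-7 <= key_signature_num <= 7):
--         raise ValueError(f"Ungültige Vorzeichenzahl: {key_signature_num}")
--     tonic_pc = (7 * key_signature_num) % 12
--     scale_pcs = {(tonic_pc + interval) % 12 for interval in _MAJOR_SCALE_INTERVALS}
--     _PITCH_CLASS_SCALES_CACHE[key_signature_num] = scale_pcs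
--     return scale_pcs
-- ===== Notes on version B (the rewrite author's own statement) =====
-- stated objective: simpler
-- what changed: Replaces the three tonic tables and the sign-based branch chain with the circle-of-fifths closed form tonic_pc = (7*key_signature_num) % 12 plus a single range check.
import Mathlib
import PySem

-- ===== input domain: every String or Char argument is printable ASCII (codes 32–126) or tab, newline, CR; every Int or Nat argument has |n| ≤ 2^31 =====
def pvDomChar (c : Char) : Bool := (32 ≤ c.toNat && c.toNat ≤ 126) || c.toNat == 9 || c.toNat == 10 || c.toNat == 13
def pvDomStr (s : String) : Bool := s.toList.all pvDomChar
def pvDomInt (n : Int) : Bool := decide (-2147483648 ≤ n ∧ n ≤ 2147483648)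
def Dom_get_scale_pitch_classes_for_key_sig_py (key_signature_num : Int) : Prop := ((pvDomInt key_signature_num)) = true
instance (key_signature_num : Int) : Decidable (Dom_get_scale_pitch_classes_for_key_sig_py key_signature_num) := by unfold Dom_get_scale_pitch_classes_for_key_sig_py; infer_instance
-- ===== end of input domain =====

-- B replaces A's three tonic tables and sign-branch chain with the circle-of-fifths closed form (7*n) % 12 (simpler).
-- Equivalence is about the RETURN value only: the Python module-level cache (identity sharing) is not modelled.

-- ===== PORT A =====
def pvMajorScaleIntervals : List Int := [0, 2, 4, 5, 7, 9, 11]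
def pvSharpKeyTonicsPc : List Int := [7, 2, 9, 4, 11, 6, 1]
def pvFlatKeyTonicsPc : List Int := [5, 10, 3, 8, 1, 6, 11]

def get_scale_pitch_classes_for_key_sig_py (key_signature_num : Int) : List Int :=
  let tonic? : Option Int :=
    if key_signature_num = 0 then some 0
    else if key_signature_num > 0 then
      if 1 ≤ key_signature_num ∧ key_signature_num ≤ 7 then
        PySem.List.pyGet? pvSharpKeyTonicsPc (key_signature_num - 1)
      else none  -- raise ValueError
    else
      if -7 ≤ key_signature_num ∧ key_signature_num ≤ -1 then
        PySem.List.pyGet? pvFlatKeyTonicsPc (-key_signature_num - 1)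
      else none  -- raise ValueError
  match tonic? with
  | none => []  -- unreachable under Pre_ (Python raises ValueError)
  | some t =>
      PySem.Set.ofList (pvMajorScaleIntervals.map (fun i => PySem.Int.mod (t + i) 12))

-- ===== PORT B =====
def get_scale_pitch_classes_for_key_sig_py_alt (key_signature_num : Int) : List Int :=
  if -7 ≤ key_signature_num ∧ key_signature_num ≤ 7 then
    let tonic_pc := PySem.Int.mod (7 * key_signature_num) 12
    PySem.Set.ofList ([0, 2, 4, 5, 7, 9, 11].map (fun i => PySem.Int.mod (tonic_pc + i) 12))
  else []  -- raise ValueError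

-- ===== PRECONDITION & SPEC =====
-- Pre_ excludes exactly the inputs where A raises ValueError (|n| > 7).
def Pre_get_scale_pitch_classes_for_key_sig_py (key_signature_num : Int) : Prop :=
  -7 ≤ key_signature_num ∧ key_signature_num ≤ 7
instance (key_signature_num : Int) : Decidable (Pre_get_scale_pitch_classes_for_key_sig_py key_signature_num) := by unfold Pre_get_scale_pitch_classes_for_key_sig_py; infer_instance
def pvWitness_get_scale_pitch_classes_for_key_sig_py : Int := (0)

def Spec_get_scale_pitch_classes_for_key_sig_py (key_signature_num : Int) (out : List Int) : Prop := out = get_scale_pitch_classes_for_key_sig_py_alt key_signature_num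
instance (key_signature_num : Int) (out : List Int) : Decidable (Spec_get_scale_pitch_classes_for_key_sig_py key_signature_num out) := by unfold Spec_get_scale_pitch_classes_for_key_sig_py; infer_instance

-- ===== CLAIM (what is proved, stated in full; the proofs are below) =====
def Claim_equal_get_scale_pitch_classes_for_key_sig_py : Prop := ∀ (key_signature_num : Int), Dom_get_scale_pitch_classes_for_key_sig_py key_signature_num → Pre_get_scale_pitch_classes_for_key_sig_py key_signature_num → Spec_get_scale_pitch_classes_for_key_sig_py key_signature_num (get_scale_pitch_classes_for_key_sig_py key_signature_num)

-- ===== LEMMAS AND PROOFS =====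

-- ===== VERDICT (by name: the statement is the Claim_ definition above) =====
theorem get_scale_pitch_classes_for_key_sig_py_spec : Claim_equal_get_scale_pitch_classes_for_key_sig_py := by
  intro k _ hpre
  unfold Spec_get_scale_pitch_classes_for_key_sig_py
  obtain ⟨h1, h2⟩ := hpre
  interval_cases k <;> decide
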